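-- pv_equiv track=rewrite | github.com/ankey207/memowave | myapp.py | remove_error
-- ===== SOURCE A (Python) =====
-- def remove_error(text):
--     indexs=[]
--     PRENOMSs=['De','Depot','Depet','A','Retrait','Paiement','Withdrawal','Received','Sent','Transfer','Deposit','Paid']
--     for fisrt_word in PRENOMSs:
--         if fisrt_word in text:
--             indexs.append(text.index(fisrt_word))
--     if indexs:
--         text = text[min(indexs):]
--     return text
-- ===== SOURCE B (Python) =====
-- def remove_error(text):
--     KEYWORDS = ('De', 'Depot', 'Depet', 'A', 'Retrait', 'Paiement', 'Withdrawal',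
--                 'Received', 'Sent', 'Transfer', 'Deposit', 'Paid')
--     for i in range(len(text)):
--         if any(text.startswith(w, i) for w in KEYWORDS):
--             return text[i:]
--     return text
-- ===== Notes on version B (the rewrite author's own statement) =====
-- stated objective: alternative
-- what changed: Instead of computing each keyword's first-occurrence index separately and taking the min, B scans the text left-to-right once and returns the suffix at the first position where any keyword starts.
import Mathlib
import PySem

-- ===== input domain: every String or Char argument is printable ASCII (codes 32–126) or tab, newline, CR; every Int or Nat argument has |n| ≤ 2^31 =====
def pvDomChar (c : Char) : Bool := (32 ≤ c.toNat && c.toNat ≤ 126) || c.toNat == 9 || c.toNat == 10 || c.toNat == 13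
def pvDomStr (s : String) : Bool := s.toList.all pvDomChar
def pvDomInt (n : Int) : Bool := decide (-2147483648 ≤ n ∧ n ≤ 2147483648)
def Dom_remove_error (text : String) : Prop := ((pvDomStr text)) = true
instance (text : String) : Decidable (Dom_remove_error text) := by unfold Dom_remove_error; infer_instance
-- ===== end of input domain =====

-- B replaces A's per-keyword first-occurrence lookups reduced by min with a single
-- left-to-right scan that stops at the first position where any keyword starts (objective: alternative).

-- ===== PORT A =====
def pvWordsA : List String :=
  ["De", "Depot", "Depet", "A", "Retrait", "Paiement", "Withdrawal",
   "Received", "Sent", "Transfer", "Deposit", "Paid"]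

def remove_error (text : String) : String :=
  let indexs : List Int :=
    pvWordsA.foldl
      (fun acc w => if PySem.Str.isIn w text then acc ++ [PySem.Str.find text w] else acc) []
  if indexs = [] then text
  else
    match PySem.List.min? indexs (fun x => x) with
    | some m => PySem.Str.slice text (some m) none
    | none => text

-- ===== PORT B =====
def pvWordsB : List (List Char) :=
  ["De".toList, "Depot".toList, "Depet".toList, "A".toList, "Retrait".toList,
   "Paiement".toList, "Withdrawal".toList, "Received".toList, "Sent".toList,
   "Transfer".toList, "Deposit".toList, "Paid".toList]

-- the loop 'for i in range(len(text)): if any(text.startswith(w, i) …): return text[i:]'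
-- as structural recursion over the suffixes of the text
def pvScan (words : List (List Char)) : List Char → Option (List Char)
  | [] => none
  | c :: rest =>
      if words.any (fun w => PySem.Chars.startswith (c :: rest) w) then some (c :: rest)
      else pvScan words rest

def remove_error_alt (text : String) : String :=
  match pvScan pvWordsB text.toList with
  | some s => String.ofList s
  | none => text

-- ===== PRECONDITION & SPEC =====
def Spec_remove_error (text : String) (out : String) : Prop := out = remove_error_alt text
instance (text : String) (out : String) : Decidable (Spec_remove_error text out) := by unfold Spec_remove_error; infer_instance

-- ===== CLAIM (what is proved, stated in full; the proofs are below) =====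
def Claim_equal_remove_error : Prop := ∀ (text : String), Dom_remove_error text → Spec_remove_error text (remove_error text)

-- ===== LEMMAS AND PROOFS =====

lemma pvScan_eq_none {words : List (List Char)} (hne : [] ∉ words) :
    ∀ (cs : List Char), pvScan words cs = none →
      ∀ j, ¬ ∃ w ∈ words, w <+: cs.drop j := by
  intro cs
  induction cs with
  | nil =>
      intro _ j hq
      obtain ⟨w, hw, hp⟩ := hq
      simp at hp
      exact hne (hp ▸ hw)
  | cons c rest ih =>
      intro h j hq
      by_cases hany : words.any (fun w => PySem.Chars.startswith (c :: rest) w) = true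
      · simp [pvScan, hany] at h
      · simp only [pvScan, hany] at h
        obtain ⟨w, hw, hp⟩ := hq
        cases j with
        | zero =>
            simp only [List.drop_zero] at hp
            exact hany (List.any_eq_true.mpr ⟨w, hw, (PySem.Chars.startswith_iff _ _).mpr hp⟩)
        | succ j' =>
            exact ih h j' ⟨w, hw, by simpa using hp⟩

lemma pvScan_eq_some {words : List (List Char)} :
    ∀ (cs : List Char) (s : List Char), pvScan words cs = some s →
      ∃ k, s = cs.drop k ∧ (∃ w ∈ words, w <+: cs.drop k) ∧
        ∀ j < k, ¬ ∃ w ∈ words, w <+: cs.drop j := by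
  intro cs
  induction cs with
  | nil => intro s h; simp [pvScan] at h
  | cons c rest ih =>
      intro s h
      by_cases hany : words.any (fun w => PySem.Chars.startswith (c :: rest) w) = true
      · refine ⟨0, ?_, ?_, by omega⟩
        · simp only [pvScan, hany, if_true, Option.some.injEq] at h
          simp [h.symm]
        · obtain ⟨w, hw, hsw⟩ := List.any_eq_true.mp hany
          exact ⟨w, hw, by simpa using (PySem.Chars.startswith_iff _ _).mp hsw⟩
      · simp only [pvScan, hany] at h
        obtain ⟨k, hs, hq, hmin⟩ := ih s h
        refine ⟨k + 1, by simpa using hs, by simpa using hq, ?_⟩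
        intro j hj hqj
        obtain ⟨w, hw, hp⟩ := hqj
        cases j with
        | zero =>
            simp only [List.drop_zero] at hp
            exact hany (List.any_eq_true.mpr ⟨w, hw, (PySem.Chars.startswith_iff _ _).mpr hp⟩)
        | succ j' =>
            exact hmin j' (by omega) ⟨w, hw, by simpa using hp⟩

lemma pvWordsB_eq : pvWordsB = pvWordsA.map String.toList := by decide

lemma pv_nil_not_mem : ([] : List Char) ∉ pvWordsB := by decide

-- the indexs list A builds, in closed form
lemma pv_indexs_eq (text : String) :
    pvWordsA.foldl
      (fun acc w => if PySem.Str.isIn w text then acc ++ [PySem.Str.find text w] else acc)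
      ([] : List Int)
    = (pvWordsA.filter (fun w => PySem.Str.isIn w text)).map (fun w => PySem.Str.find text w) := by
  simpa using PySem.List.foldl_append_if (fun w => PySem.Str.isIn w text)
    (fun w => PySem.Str.find text w) pvWordsA []

-- ===== VERDICT (by name: the statement is the Claim_ definition above) =====
theorem remove_error_spec : Claim_equal_remove_error := by
  intro text _
  unfold Spec_remove_error remove_error remove_error_alt
  rw [pv_indexs_eq]
  cases hscan : pvScan pvWordsB text.toList with
  | none =>
      -- no keyword occurs anywhere: indexs is empty, both return text
      have hnone := pvScan_eq_none pv_nil_not_mem _ hscan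
      have hfil : pvWordsA.filter (fun w => PySem.Str.isIn w text) = [] := by
        rw [List.filter_eq_nil_iff]
        intro w hw hin
        rw [PySem.Str.isIn_eq] at hin
        obtain ⟨j, hj⟩ := (PySem.Chars.exists_prefix_drop_iff_isIn _ _).mpr hin
        exact hnone j ⟨w.toList, pvWordsB_eq ▸ List.mem_map_of_mem hw, hj⟩
      rw [hfil]
      simp
  | some s =>
      obtain ⟨k, hs, ⟨w0, hw0, hp0⟩, hmin⟩ := pvScan_eq_some _ _ hscan
      obtain ⟨wa, hwa, hwa0⟩ := List.mem_map.mp (pvWordsB_eq ▸ hw0)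
      -- wa occurs in text (at position k), so indexs is nonempty
      have hwaIn : PySem.Str.isIn wa text = true := by
        rw [PySem.Str.isIn_eq]
        exact (PySem.Chars.exists_prefix_drop_iff_isIn _ _).mp ⟨k, hwa0 ▸ hp0⟩
      have hmem : PySem.Str.find text wa ∈
          (pvWordsA.filter (fun w => PySem.Str.isIn w text)).map (fun w => PySem.Str.find text w) :=
        List.mem_map_of_mem (List.mem_filter.mpr ⟨hwa, hwaIn⟩)
      have hne : (pvWordsA.filter (fun w => PySem.Str.isIn w text)).map
          (fun w => PySem.Str.find text w) ≠ [] := by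
        intro h; rw [h] at hmem; exact (List.not_mem_nil) hmem
      cases hm : PySem.List.min? ((pvWordsA.filter (fun w => PySem.Str.isIn w text)).map
          (fun w => PySem.Str.find text w)) (fun x => x) with
      | none => exact absurd ((PySem.List.min?_eq_none_iff _ _).mp hm) hne
      | some m =>
          -- m is find(text, w') for some present keyword w'
          obtain ⟨w', hw', hmw'⟩ := List.mem_map.mp (PySem.List.min?_mem hm)
          have hw'In : PySem.Str.isIn w' text = true := (List.mem_filter.mp hw').2
          have hw'inf : w'.toList <:+: text.toList := by
            rw [PySem.Str.isIn_eq] at hw'In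
            exact (PySem.Chars.isIn_iff_infix _ _).mp hw'In
          have hm0 : 0 ≤ m := by
            rw [← hmw', PySem.Str.find_eq]
            exact (PySem.Chars.find_nonneg_iff _ _).mpr hw'inf
          have hspec := PySem.Chars.find_spec (s := text.toList) (sub := w'.toList)
            (by rw [← PySem.Str.find_eq]; omega)
          -- k ≤ m.toNat : no keyword starts before k, but w' starts at m.toNat
          have hkm : k ≤ m.toNat := by
            by_contra hlt
            exact hmin m.toNat (by omega)
              ⟨w'.toList, pvWordsB_eq ▸ List.mem_map_of_mem (List.mem_filter.mp hw').1,
               by rw [← PySem.Str.find_eq, hmw'] at hspec; exact hspec.1⟩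
          -- m ≤ k : w0 occurs at k, so find(text, wa) ≤ k, and m is minimal in indexs
          have hfka : PySem.Str.find text wa ≤ (k : Int) := by
            rw [PySem.Str.find_eq]
            have hspa := PySem.Chars.find_spec (s := text.toList) (sub := wa.toList)
              ((PySem.Chars.find_nonneg_iff _ _).mpr
                ((PySem.Chars.isIn_iff_infix _ _).mp (by rw [PySem.Str.isIn_eq] at hwaIn; exact hwaIn)))
            have h0 : (0:Int) ≤ PySem.Chars.find text.toList wa.toList :=
              (PySem.Chars.find_nonneg_iff _ _).mpr
                ((PySem.Chars.isIn_iff_infix _ _).mp (by rw [PySem.Str.isIn_eq] at hwaIn; exact hwaIn))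
            by_contra hgt
            exact hspa.2 k (by omega) (hwa0 ▸ hp0)
          have hmk : m ≤ (k : Int) := le_trans (PySem.List.min?_isMin hm _ hmem) hfka
          have hmeq : m = (k : Int) := by omega
          -- both sides are text.drop k
          have : (PySem.Str.slice text (some m) none).toList = s := by
            rw [PySem.Str.toList_slice, PySem.Chars.slice_eq_listSlice, hmeq, hs]
            exact_mod_cast PySem.List.slice_from_natCast text.toList k
          simp only [hne, if_false, hm]
          exact String.toList_inj.mp (by rw [this, String.toList_ofList])
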